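-- pv_equiv track=rewrite | github.com/Crisdanielb1/stanza-linguistic-suite | modules/utils.py | validate_processors
-- ===== SOURCE A (Python) =====
-- from typing import Tuple, Dict, Any, Optional
--
-- _ALLOWED_PROCESSORS = {
--     "tokenize", "mwt", "pos", "lemma", "depparse", "ner",
--     # otros posibles: "sentiment", "constituency", "depparse", "coref" (según modelos instalados)
-- }
--
-- def validate_processors(proc_str: str) -> Tuple[str, list[str]]:
--     """
--     Validación ligera de la cadena 'processors' de Stanza.
--     - Elimina espacios extra.
--     - Quita duplicados preservando el orden.
--     - Advierte si hay procesadores desconocidos.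
--     - Reordena mínimamente para que 'tokenize' vaya primero y 'mwt' después si aparecen.
--     Retorna: (proc_normalizado, warnings)
--     """
--     warnings: list[str] = []
--     parts_raw = [p.strip() for p in proc_str.split(",") if p.strip()]
--     seen = set()
--     parts = []
--     for p in parts_raw:
--         if p not in seen:
--             parts.append(p)
--             seen.add(p)
--
--     unknown = [p for p in parts if p not in _ALLOWED_PROCESSORS]
--     if unknown:
--         warnings.append(f"Procesadores no reconocidos: {', '.join(unknown)}")
--
--     # reordenar suavemente: tokenize -> mwt -> pos -> lemma -> depparse -> ner -> (resto)
--     priority = {name: i for i, name in enumerate(["tokenize", "mwt", "pos", "lemma", "depparse", "ner"])}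
--     parts_sorted = sorted(parts, key=lambda x: priority.get(x, 999))
--
--     # asegurar tokenize primero si existe alguno más
--     if "tokenize" in parts_sorted and parts_sorted[0] != "tokenize":
--         warnings.append("Reordenado: 'tokenize' movido al inicio.")
--         parts_sorted.remove("tokenize")
--         parts_sorted.insert(0, "tokenize")
--
--     normalized = ",".join(parts_sorted)
--     return normalized, warnings
-- ===== SOURCE B (Python) =====
-- _ORDER = ["tokenize", "mwt", "pos", "lemma", "depparse", "ner"]
--
-- def validate_processors(proc_str):
--     # single pass: strip, drop empties and duplicates
--     seen = set()
--     parts = []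
--     for raw in proc_str.split(","):
--         p = raw.strip()
--         if p and p not in seen:
--             seen.add(p)
--             parts.append(p)
--     unknown = [p for p in parts if p not in _ORDER]
--     warnings = ["Procesadores no reconocidos: " + ", ".join(unknown)] if unknown else []
--     # table-driven ordering: known names in the fixed order, then unknowns in first-seen order
--     ordered = [name for name in _ORDER if name in seen] + unknown
--     return ",".join(ordered), warnings
-- ===== Notes on version B (the rewrite author's own statement) =====
-- stated objective: simpler
-- what changed: B replaces A's two-pass strip/filter-then-dedup and priority-keyed stable sort (plus A's dead tokenize-reorder warning block) with a single strip+dedup pass and a table-driven rebuild: it walks the fixed order list appending the known names present, then appends the unknowns in first-seen order.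
import Mathlib
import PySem

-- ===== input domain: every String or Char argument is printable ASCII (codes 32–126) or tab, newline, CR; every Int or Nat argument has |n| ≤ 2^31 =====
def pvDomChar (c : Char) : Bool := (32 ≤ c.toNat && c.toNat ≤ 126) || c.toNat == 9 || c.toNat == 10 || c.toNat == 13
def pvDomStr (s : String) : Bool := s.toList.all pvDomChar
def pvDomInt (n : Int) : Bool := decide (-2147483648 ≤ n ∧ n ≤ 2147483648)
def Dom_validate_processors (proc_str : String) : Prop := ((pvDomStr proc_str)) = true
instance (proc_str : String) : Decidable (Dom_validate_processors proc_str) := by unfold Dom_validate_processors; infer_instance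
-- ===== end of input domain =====

-- B replaces A's priority-keyed stable sort (and A's dead tokenize-reorder warning block) by a
-- single strip+dedup pass and a table-driven rebuild over the fixed processor order; objective: simpler.

-- ===== PORT A =====

def aAllowed : PySem.Set String :=
  PySem.Set.ofList ["tokenize", "mwt", "pos", "lemma", "depparse", "ner"]

-- the 'for p in parts_raw: if p not in seen: parts.append(p); seen.add(p)' loop
def aDedup : List String → PySem.Set String → List String → List String
  | [], _, parts => parts
  | p :: rest, seen, parts =>
    if PySem.Set.contains seen p then aDedup rest seen parts
    else aDedup rest (PySem.Set.add seen p) (parts ++ [p])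

-- priority = {name: i for i, name in enumerate([...])}
def aPriority : PySem.Dict String Int :=
  (PySem.List.enumerate ["tokenize", "mwt", "pos", "lemma", "depparse", "ner"]).foldl
    (fun d p => d.insert p.2 p.1) (PySem.Dict.mk [])

def aKey (x : String) : Int := PySem.Dict.getD aPriority x 999

def validate_processors (proc_str : String) : String × List String :=
  let parts_raw := (((PySem.Str.split? proc_str ",").getD []).map PySem.Str.strip).filter
      (fun p => p ≠ "")
  let parts := aDedup parts_raw PySem.Set.empty []
  let unknown := parts.filter (fun p => ¬ PySem.Set.contains aAllowed p)
  let warnings : List String :=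
    if unknown ≠ [] then ["Procesadores no reconocidos: " ++ PySem.Str.join ", " unknown] else []
  let parts_sorted := PySem.List.sorted parts aKey
  if "tokenize" ∈ parts_sorted ∧ PySem.List.pyGet? parts_sorted 0 ≠ some "tokenize" then
    let ps := (PySem.List.remove? parts_sorted "tokenize").getD parts_sorted
    let ps := PySem.List.insert ps 0 "tokenize"
    (PySem.Str.join "," ps, warnings ++ ["Reordenado: 'tokenize' movido al inicio."])
  else
    (PySem.Str.join "," parts_sorted, warnings)

-- ===== PORT B =====

def pvOrder : List String := ["tokenize", "mwt", "pos", "lemma", "depparse", "ner"]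

-- the single 'for raw in proc_str.split(","): p = raw.strip(); if p and p not in seen: …' pass
def bLoop : List String → PySem.Set String → List String → PySem.Set String × List String
  | [], seen, parts => (seen, parts)
  | raw :: rest, seen, parts =>
    let p := PySem.Str.strip raw
    if p ≠ "" ∧ ¬ PySem.Set.contains seen p then bLoop rest (PySem.Set.add seen p) (parts ++ [p])
    else bLoop rest seen parts

def validate_processors_alt (proc_str : String) : String × List String :=
  let sp := bLoop ((PySem.Str.split? proc_str ",").getD []) PySem.Set.empty []
  let unknown := sp.2.filter (fun p => ¬ p ∈ pvOrder)
  let warnings : List String :=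
    if unknown ≠ [] then ["Procesadores no reconocidos: " ++ PySem.Str.join ", " unknown] else []
  let ordered := (pvOrder.filter (fun name => PySem.Set.contains sp.1 name)) ++ unknown
  (PySem.Str.join "," ordered, warnings)

-- ===== PRECONDITION & SPEC =====
def Spec_validate_processors (proc_str : String) (out : String × List String) : Prop := out = validate_processors_alt proc_str
instance (proc_str : String) (out : String × List String) : Decidable (Spec_validate_processors proc_str out) := by unfold Spec_validate_processors; infer_instance

-- ===== CLAIM (what is proved, stated in full; the proofs are below) =====
def Claim_equal_validate_processors : Prop := ∀ (proc_str : String), Dom_validate_processors proc_str → Spec_validate_processors proc_str (validate_processors proc_str)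

-- ===== LEMMAS AND PROOFS =====

theorem contains_iff_mem (s : PySem.Set String) (x : String) :
    PySem.Set.contains s x = true ↔ x ∈ s := by
  simp [PySem.Set.contains]

theorem aKey_closed (p : String) :
    aKey p = if p = "tokenize" then 0 else if p = "mwt" then 1 else if p = "pos" then 2
      else if p = "lemma" then 3 else if p = "depparse" then 4 else if p = "ner" then 5
      else 999 := by
  have h : aPriority = PySem.Dict.mk
      [("tokenize", 0), ("mwt", 1), ("pos", 2), ("lemma", 3), ("depparse", 4), ("ner", 5)] := by
    decide
  simp [aKey, h, PySem.Dict.getD, PySem.Dict.get?, List.find?]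
  (repeat' split) <;> simp_all [beq_iff_eq]

theorem bLoop_spec (l : List String) : ∀ (seen : PySem.Set String) (parts : List String),
    (∀ x, PySem.Set.contains seen x = true ↔ x ∈ parts) → parts.Nodup →
    (∀ x, PySem.Set.contains (bLoop l seen parts).1 x = true ↔ x ∈ (bLoop l seen parts).2) ∧
      (bLoop l seen parts).2.Nodup ∧
      (bLoop l seen parts).2 = aDedup ((l.map PySem.Str.strip).filter (fun p => p ≠ "")) seen parts := by
  induction l with
  | nil => intro seen parts h hnd; exact ⟨h, hnd, rfl⟩
  | cons raw rest ih =>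
    intro seen parts h hnd
    by_cases hp : PySem.Str.strip raw = ""
    · have hb : bLoop (raw :: rest) seen parts = bLoop rest seen parts := by
        simp [bLoop, hp]
      rw [hb]
      have hf : ((raw :: rest).map PySem.Str.strip).filter (fun p => p ≠ "")
          = (rest.map PySem.Str.strip).filter (fun p => p ≠ "") := by
        simp [hp]
      rw [hf]
      exact ih seen parts h hnd
    · have hf : ((raw :: rest).map PySem.Str.strip).filter (fun p => p ≠ "")
          = PySem.Str.strip raw :: (rest.map PySem.Str.strip).filter (fun p => p ≠ "") := by
        simp [hp]
      rw [hf]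
      by_cases hs : PySem.Str.strip raw ∈ seen
      all_goals have hsc := contains_iff_mem seen (PySem.Str.strip raw)
      · have hb : bLoop (raw :: rest) seen parts = bLoop rest seen parts := by
          simp only [bLoop]
          rw [if_neg (fun hc => hc.2 (hsc.mpr hs))]
        have ha : aDedup (PySem.Str.strip raw :: (rest.map PySem.Str.strip).filter (fun p => p ≠ ""))
            seen parts = aDedup ((rest.map PySem.Str.strip).filter (fun p => p ≠ "")) seen parts := by
          simp only [aDedup]
          rw [if_pos (hsc.mpr hs)]
        rw [hb, ha]
        exact ih seen parts h hnd
      · have hb : bLoop (raw :: rest) seen parts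
            = bLoop rest (PySem.Set.add seen (PySem.Str.strip raw)) (parts ++ [PySem.Str.strip raw]) := by
          simp only [bLoop]
          rw [if_pos ⟨hp, fun hc => hs (hsc.mp hc)⟩]
        have ha : aDedup (PySem.Str.strip raw :: (rest.map PySem.Str.strip).filter (fun p => p ≠ ""))
            seen parts = aDedup ((rest.map PySem.Str.strip).filter (fun p => p ≠ ""))
              (PySem.Set.add seen (PySem.Str.strip raw)) (parts ++ [PySem.Str.strip raw]) := by
          simp only [aDedup]
          rw [if_neg (fun hc => hs (hsc.mp hc))]
        rw [hb, ha]
        have hnm : PySem.Str.strip raw ∉ parts := fun hm => hs (hsc.mp ((h _).mpr hm))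
        refine ih _ _ ?_ ?_
        · intro x
          rw [contains_iff_mem, PySem.Set.mem_add]
          rw [← contains_iff_mem, h x]
          simp
        · simp [List.nodup_append, hnd]
          exact fun a ha he => hnm (he ▸ ha)

theorem insertBy_cons_all {α : Type} (bef : α → α → Bool) (x : α) (zs : List α)
    (h : ∀ y ∈ zs, bef x y = true) :
    PySem.List.insertBy bef x zs = x :: zs := by
  cases zs with
  | nil => simp [PySem.List.insertBy]
  | cons y ys => simp [PySem.List.insertBy, h y (by simp)]

theorem insertBy_append_left {α : Type} (bef : α → α → Bool) (x : α) (ys zs : List α)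
    (h : ∀ y ∈ ys, bef x y = false) :
    PySem.List.insertBy bef x (ys ++ zs) = ys ++ PySem.List.insertBy bef x zs := by
  induction ys with
  | nil => simp
  | cons y ys ih =>
    simp only [List.cons_append, PySem.List.insertBy, h y (by simp)]
    simp [ih (fun a ha => h a (by simp [ha]))]

theorem insert_buckets (key : String → Int) (x : String) (l : List String) :
    ∀ ks : List Int, ks.Pairwise (· < ·) → key x ∈ ks →
    PySem.List.insertBy (fun a b => decide (key a < key b)) x
        ((ks.map (fun k => l.filter (fun p => decide (key p = k)))).flatten)
      = (ks.map (fun k => (l ++ [x]).filter (fun p => decide (key p = k)))).flatten := by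
  intro ks
  induction ks with
  | nil => intro _ hx; simp at hx
  | cons k0 ks ih =>
    intro hpw hx
    have hgt : ∀ k' ∈ ks, k0 < k' := (List.pairwise_cons.mp hpw).1
    simp only [List.map_cons, List.flatten_cons, List.filter_append]
    by_cases hk : key x = k0
    · have hb0 : ∀ y ∈ l.filter (fun p => decide (key p = k0)),
          (fun a b => decide (key a < key b)) x y = false := by
        intro y hy
        have := (List.mem_filter.mp hy).2
        simp at this
        simp [this, hk]
      rw [insertBy_append_left _ _ _ _ hb0]
      have hrest : ∀ y ∈ (ks.map (fun k => l.filter (fun p => decide (key p = k)))).flatten,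
          (fun a b => decide (key a < key b)) x y = true := by
        intro y hy
        simp only [List.mem_flatten, List.mem_map] at hy
        obtain ⟨_, ⟨k', hk', rfl⟩, hy⟩ := hy
        have := (List.mem_filter.mp hy).2
        simp at this
        simp [this, hk]
        exact hgt _ hk'
      rw [insertBy_cons_all _ _ _ hrest]
      have hmap : ks.map (fun k => l.filter (fun p => decide (key p = k))
            ++ [x].filter (fun p => decide (key p = k)))
          = ks.map (fun k => l.filter (fun p => decide (key p = k))) := by
        refine List.map_congr_left ?_
        intro k hkk
        have hne : key x ≠ k := by
          have := hgt _ hkk; omega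
        simp [hne]
      simp only [List.filter_append] at *
      rw [hmap]
      simp [hk]
    · have hx' : key x ∈ ks := by
        rcases List.mem_cons.mp hx with h | h
        · exact absurd h hk
        · exact h
      have hlt : k0 < key x := hgt _ hx'
      have hb0 : ∀ y ∈ l.filter (fun p => decide (key p = k0)),
          (fun a b => decide (key a < key b)) x y = false := by
        intro y hy
        have := (List.mem_filter.mp hy).2
        simp at this
        simp [this]; omega
      rw [insertBy_append_left _ _ _ _ hb0, ih (List.pairwise_cons.mp hpw).2 hx']
      simp [hk]

theorem sorted_eq_buckets (key : String → Int) (ks : List Int) (hpw : ks.Pairwise (· < ·))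
    (l : List String) :
    (∀ p ∈ l, key p ∈ ks) →
      PySem.List.sorted l key = (ks.map (fun k => l.filter (fun p => decide (key p = k)))).flatten := by
  induction l using List.reverseRecOn with
  | nil => intro _; simp [PySem.List.sorted]
  | append_singleton l x ih =>
    intro hmem
    have hl : ∀ p ∈ l, key p ∈ ks := fun p hp => hmem p (by simp [hp])
    have hx : key x ∈ ks := hmem x (by simp)
    have h1 : PySem.List.sorted (l ++ [x]) key
        = PySem.List.insertBy (fun a b => decide (key a < key b)) x (PySem.List.sorted l key) := by
      rw [PySem.List.sorted_eq_foldl_insertBy, PySem.List.sorted_eq_foldl_insertBy,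
        List.foldl_append]
      rfl
    rw [h1, ih hl, insert_buckets key x l ks hpw hx]

theorem filter_eq_singleton_of_nodup (l : List String) (hnd : l.Nodup) (a : String) :
    l.filter (fun p => decide (p = a)) = if a ∈ l then [a] else [] := by
  induction l with
  | nil => simp
  | cons y ys ih =>
    have hy : y ∉ ys := (List.nodup_cons.mp hnd).1
    by_cases h : y = a
    · subst h
      have : ys.filter (fun p => decide (p = y)) = [] := by
        rw [ih (List.nodup_cons.mp hnd).2]
        simp [hy]
      simp [this]
    · rw [List.filter_cons, ih (List.nodup_cons.mp hnd).2]
      by_cases hm : a ∈ ys <;> simp [h, hm, Ne.symm h]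

theorem main_core (parts : List String) (hnd : parts.Nodup) :
    PySem.List.sorted parts aKey
      = pvOrder.filter (fun n => decide (n ∈ parts))
        ++ parts.filter (fun p => decide (¬ p ∈ pvOrder)) := by
  have hmem : ∀ p ∈ parts, aKey p ∈ ([0, 1, 2, 3, 4, 5, 999] : List Int) := by
    intro p _
    rw [aKey_closed]
    split_ifs <;> decide
  rw [sorted_eq_buckets aKey _ (by decide) parts hmem]
  have hb : ∀ (k : Int) (name : String), (∀ p, aKey p = k ↔ p = name) →
      parts.filter (fun p => decide (aKey p = k)) = if name ∈ parts then [name] else [] := by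
    intro k name hiff
    rw [List.filter_congr (fun p _ => decide_eq_decide.mpr (hiff p)),
      filter_eq_singleton_of_nodup parts hnd name]
  have h0 := hb 0 "tokenize" (fun p => by rw [aKey_closed]; split_ifs <;> simp_all)
  have h1 := hb 1 "mwt" (fun p => by rw [aKey_closed]; split_ifs <;> simp_all)
  have h2 := hb 2 "pos" (fun p => by rw [aKey_closed]; split_ifs <;> simp_all)
  have h3 := hb 3 "lemma" (fun p => by rw [aKey_closed]; split_ifs <;> simp_all)
  have h4 := hb 4 "depparse" (fun p => by rw [aKey_closed]; split_ifs <;> simp_all)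
  have h5 := hb 5 "ner" (fun p => by rw [aKey_closed]; split_ifs <;> simp_all)
  have h999 : parts.filter (fun p => decide (aKey p = 999))
      = parts.filter (fun p => decide (¬ p ∈ pvOrder)) := by
    refine List.filter_congr ?_
    intro p _
    refine decide_eq_decide.mpr ?_
    rw [aKey_closed]
    split_ifs <;> simp_all [pvOrder]
  simp only [List.map_cons, List.map_nil, List.flatten_cons, List.flatten_nil, List.append_nil,
    h0, h1, h2, h3, h4, h5, h999]
  by_cases t1 : "tokenize" ∈ parts <;> by_cases t2 : "mwt" ∈ parts <;>
    by_cases t3 : "pos" ∈ parts <;> by_cases t4 : "lemma" ∈ parts <;>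
    by_cases t5 : "depparse" ∈ parts <;> by_cases t6 : "ner" ∈ parts <;>
    simp [pvOrder, t1, t2, t3, t4, t5, t6]

-- ===== VERDICT (by name: the statement is the Claim_ definition above) =====
theorem validate_processors_spec : Claim_equal_validate_processors := by
  intro proc_str _
  unfold Spec_validate_processors validate_processors validate_processors_alt
  obtain ⟨hSeen, hnd, hEq⟩ := bLoop_spec ((PySem.Str.split? proc_str ",").getD [])
    PySem.Set.empty [] (by intro x; simp [PySem.Set.contains, PySem.Set.empty]) (by simp)
  set parts := aDedup ((((PySem.Str.split? proc_str ",").getD []).map PySem.Str.strip).filter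
    (fun p => p ≠ "")) PySem.Set.empty [] with hparts
  rw [hEq] at hSeen
  have hndp : parts.Nodup := hEq ▸ hnd
  have hco : ∀ name, PySem.Set.contains
      (bLoop ((PySem.Str.split? proc_str ",").getD []) PySem.Set.empty []).1 name
      = decide (name ∈ parts) := by
    intro name
    by_cases h : name ∈ parts
    · rw [(hSeen name).mpr h]
      simp [h]
    · have hfalse : PySem.Set.contains
          (bLoop ((PySem.Str.split? proc_str ",").getD []) PySem.Set.empty []).1 name = false := by
        cases hcase : PySem.Set.contains
            (bLoop ((PySem.Str.split? proc_str ",").getD []) PySem.Set.empty []).1 name with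
        | false => rfl
        | true => exact absurd ((hSeen name).mp hcase) h
      rw [hfalse]
      simp [h]
  have hsorted := main_core parts hndp
  have hcond : ¬ ("tokenize" ∈ PySem.List.sorted parts aKey ∧
      PySem.List.pyGet? (PySem.List.sorted parts aKey) 0 ≠ some "tokenize") := by
    rintro ⟨hmem, hget⟩
    have ht : "tokenize" ∈ parts := (PySem.List.mem_sorted parts aKey false "tokenize").mp hmem
    apply hget
    rw [hsorted]
    have : pvOrder.filter (fun n => decide (n ∈ parts)) = "tokenize" ::
        (["mwt", "pos", "lemma", "depparse", "ner"].filter (fun n => decide (n ∈ parts))) := by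
      simp [pvOrder, List.filter_cons, ht]
    rw [this]
    simp [PySem.List.pyGet?, PySem.List.pyIdx?]
    rw [if_pos (by positivity)]
    simp
  rw [if_neg hcond]
  have hunk : (bLoop ((PySem.Str.split? proc_str ",").getD []) PySem.Set.empty []).2.filter
      (fun p => decide (¬ p ∈ pvOrder)) = parts.filter (fun p => decide (¬ p ∈ pvOrder)) := by
    rw [hEq]
  have hunk2 : parts.filter (fun p => ¬ PySem.Set.contains aAllowed p)
      = parts.filter (fun p => decide (¬ p ∈ pvOrder)) := by
    refine List.filter_congr ?_
    intro p _
    simp [aAllowed, pvOrder, PySem.Set.contains, PySem.Set.ofList]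
  have hfil : pvOrder.filter (fun name => PySem.Set.contains
      (bLoop ((PySem.Str.split? proc_str ",").getD []) PySem.Set.empty []).1 name)
      = pvOrder.filter (fun n => decide (n ∈ parts)) :=
    List.filter_congr (fun n _ => hco n)
  dsimp only
  rw [hunk, hfil, hunk2, hsorted]
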